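-- pv_equiv track=rewrite | github.com/FATTY-BAMBA/Class_Genuis_Copy | app/qa_generation.py | preprocess_asr_text
-- ===== SOURCE A (Python) =====
-- from typing import Dict, List, Optional, Tuple, Callable, Any
-- from typing import List, Optional
--
-- def sec_to_hms(sec: int) -> str:
--     """Convert seconds to HH:MM:SS format"""
--     h, rem = divmod(int(sec), 3600)
--     m, s = divmod(rem, 60)
--     return f"{h:02d}:{m:02d}:{s:02d}"
--
-- def preprocess_asr_text(raw_asr_text: str, min_chunk_duration: int = 60, max_gap: int = 10) -> str:
--     """Preprocess raw ASR text by combining lines into meaningful chunks."""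
--     lines = raw_asr_text.strip().split('\n')
--     chunks: List[str] = []
--     current_chunk: List[str] = []
--     current_start_time: Optional[int] = None
--     current_end_time: Optional[int] = None
--     for line in lines:
--         if not line.strip():
--             continue
--         if ':' in line and len(line.split(':', 1)) > 1:
--             time_part, content = line.split(':', 1)
--             time_part = time_part.strip()
--             content = content.strip()
--             if not content:
--                 continue
--             try:
--                 if time_part.count(':') == 2:  # HH:MM:SS
--                     h, m, s = map(int, time_part.split(':'))
--                     timestamp_sec = h * 3600 + m * 60 + s
--                 elif time_part.count(':') == 1:  # MM:SS
--                     m, s = map(int, time_part.split(':'))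
--                     timestamp_sec = m * 60 + s
--                 else:
--                     continue
--             except ValueError:
--                 continue
--             if current_start_time is None:
--                 current_start_time = timestamp_sec
--                 current_end_time = timestamp_sec
--                 current_chunk = [content]
--             elif timestamp_sec - current_end_time > max_gap:
--                 if current_chunk and current_end_time - current_start_time >= min_chunk_duration:
--                     chunk_text = ' '.join(current_chunk)
--                     chunks.append(f"[{sec_to_hms(current_start_time)}-{sec_to_hms(current_end_time)}] {chunk_text}")
--                 current_start_time = timestamp_sec
--                 current_end_time = timestamp_sec
--                 current_chunk = [content]
--             else:
--                 current_chunk.append(content)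
--                 current_end_time = timestamp_sec
--         else:
--             if current_chunk:
--                 current_chunk.append(line.strip())
--     if current_chunk and current_end_time is not None and current_start_time is not None:
--         dur = current_end_time - current_start_time
--         if dur >= min_chunk_duration or not chunks:
--             chunk_text = ' '.join(current_chunk)
--             chunks.append(f"[{sec_to_hms(current_start_time)}-{sec_to_hms(current_end_time)}] {chunk_text}")
--     if not chunks:
--         cleaned_lines = []
--         for line in lines:
--             if ':' in line and len(line.split(':', 1)) > 1:
--                 _, content = line.split(':', 1)
--                 if content.strip():
--                     cleaned_lines.append(content.strip())
--         return ' '.join(cleaned_lines)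
--     return '\n\n'.join(chunks)
-- ===== SOURCE B (Python) =====
-- def preprocess_asr_text(raw_asr_text: str, min_chunk_duration: int = 60, max_gap: int = 10) -> str:
--     # A's chunk-building state machine is dead code (time_part = line.split(':', 1)[0]
--     # never contains ':', so its count(':') check always fails and no chunk is ever built);
--     # the always-taken fallback is the whole observable behaviour, implemented here directly.
--     def tail_of(line):
--         i = line.find(':')
--         return line[i + 1:].strip() if i != -1 else ''
--     tails = [tail_of(line) for line in raw_asr_text.strip().split('\n')]
--     return ' '.join(t for t in tails if t)
-- ===== Notes on version B (the rewrite author's own statement) =====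
-- stated objective: simpler
-- what changed: A's entire timestamp-chunking state machine is dead code (the time part A inspects is taken from before a line's first colon, so it can never itself contain a colon and A's colon-count check always fails, building no chunk); B drops it and directly computes the always-taken fallback: join the non-empty stripped text after each line's first colon.
import Mathlib
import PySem

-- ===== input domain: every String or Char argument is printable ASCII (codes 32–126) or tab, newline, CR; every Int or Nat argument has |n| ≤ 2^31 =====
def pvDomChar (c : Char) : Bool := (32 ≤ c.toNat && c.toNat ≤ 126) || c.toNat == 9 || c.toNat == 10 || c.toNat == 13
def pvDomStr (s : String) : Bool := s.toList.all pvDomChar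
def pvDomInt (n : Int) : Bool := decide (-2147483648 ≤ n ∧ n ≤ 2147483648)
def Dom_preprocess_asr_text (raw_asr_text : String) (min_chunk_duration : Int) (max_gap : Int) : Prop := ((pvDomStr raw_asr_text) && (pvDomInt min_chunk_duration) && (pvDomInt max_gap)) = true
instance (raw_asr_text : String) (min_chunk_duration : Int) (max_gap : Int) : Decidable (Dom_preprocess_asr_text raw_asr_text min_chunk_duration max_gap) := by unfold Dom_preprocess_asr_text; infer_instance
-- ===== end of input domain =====

-- B simply drops A's timestamp-chunking state machine, which is dead code (the time part A inspects
-- is taken from before a line's first colon, so it can never itself contain a colon and the colon-count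
-- check always fails), and computes A's always-taken fallback join directly (objective: simpler).

-- ===== PORT A =====

-- sec_to_hms; f"{x:02d}" is rendered exactly as str(x).zfill(2) (identical for every int)
def pvSecToHms (sec : Int) : List Char :=
  let h := PySem.Int.floordiv sec 3600
  let rem := PySem.Int.mod sec 3600
  let m := PySem.Int.floordiv rem 60
  let s := PySem.Int.mod rem 60
  PySem.Chars.zfill (PySem.Int.toChars h) 2 ++ [':'] ++ PySem.Chars.zfill (PySem.Int.toChars m) 2
    ++ [':'] ++ PySem.Chars.zfill (PySem.Int.toChars s) 2

-- the try/except timestamp parse: some = parsed seconds, none = the 'continue' cases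
def pvParseTs (tp : List Char) : Option Int :=
  if PySem.Chars.count tp [':'] = 2 then
    match PySem.Chars.splitOn tp [':'] with
    | [x, y, z] =>
        (PySem.Int.ofChars? x).bind fun h =>
        (PySem.Int.ofChars? y).bind fun m =>
        (PySem.Int.ofChars? z).map fun s => h * 3600 + m * 60 + s
    | _ => none
  else if PySem.Chars.count tp [':'] = 1 then
    match PySem.Chars.splitOn tp [':'] with
    | [x, y] =>
        (PySem.Int.ofChars? x).bind fun m =>
        (PySem.Int.ofChars? y).map fun s => m * 60 + s
    | _ => none
  else none

-- f"[{sec_to_hms(start)}-{sec_to_hms(end)}] {chunk_text}"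
def pvFmtChunk (s e : Int) (chunk : List (List Char)) : List Char :=
  ['['] ++ pvSecToHms s ++ ['-'] ++ pvSecToHms e ++ [']', ' '] ++ PySem.Chars.join [' '] chunk

-- one iteration of A's main loop; state = (chunks, current_chunk, current_start, current_end)
def pvAStep (max_gap min_chunk_duration : Int)
    (st : List (List Char) × List (List Char) × Option Int × Option Int) (line : List Char) :
    List (List Char) × List (List Char) × Option Int × Option Int :=
  let (chunks, cur, cs, ce) := st
  if PySem.Chars.strip line = [] then (chunks, cur, cs, ce)
  else if PySem.Chars.isIn [':'] line && decide (1 < (PySem.Chars.splitOnMax line [':'] 1).length) then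
    let parts := PySem.Chars.splitOnMax line [':'] 1
    let tp := PySem.Chars.strip (parts.getD 0 [])
    let c := PySem.Chars.strip (parts.getD 1 [])
    if c = [] then (chunks, cur, cs, ce)
    else
      match pvParseTs tp with
      | none => (chunks, cur, cs, ce)
      | some ts =>
        match cs with
        | none => (chunks, [c], some ts, some ts)
        | some s =>
          let e := ce.getD 0   -- current_end is always set when current_start is
          if max_gap < ts - e then
            if cur ≠ [] ∧ min_chunk_duration ≤ e - s then
              (chunks ++ [pvFmtChunk s e cur], [c], some ts, some ts)
            else (chunks, [c], some ts, some ts)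
          else (chunks, cur ++ [c], cs, some ts)
  else
    if cur ≠ [] then (chunks, cur ++ [PySem.Chars.strip line], cs, ce) else (chunks, cur, cs, ce)

-- one iteration of A's fallback loop over the raw lines
def pvCleanStep (acc : List (List Char)) (line : List Char) : List (List Char) :=
  if PySem.Chars.isIn [':'] line && decide (1 < (PySem.Chars.splitOnMax line [':'] 1).length) then
    let content := (PySem.Chars.splitOnMax line [':'] 1).getD 1 []
    if PySem.Chars.strip content ≠ [] then acc ++ [PySem.Chars.strip content] else acc
  else acc

def preprocess_asr_text (raw_asr_text : String) (min_chunk_duration : Int) (max_gap : Int) : String :=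
  let lines := PySem.Chars.splitOn (PySem.Chars.strip raw_asr_text.toList) ['\n']
  let st := lines.foldl (pvAStep max_gap min_chunk_duration) ([], [], none, none)
  let chunks :=
    match st.2.2.1, st.2.2.2 with
    | some s, some e =>
      if st.2.1 ≠ [] ∧ (min_chunk_duration ≤ e - s ∨ st.1 = []) then st.1 ++ [pvFmtChunk s e st.2.1]
      else st.1
    | _, _ => st.1
  if chunks = [] then
    String.ofList (PySem.Chars.join [' '] (lines.foldl pvCleanStep []))
  else
    String.ofList (PySem.Chars.join ['\n', '\n'] chunks)

-- ===== PORT B =====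

def pvTailOf (line : List Char) : List Char :=
  let i := PySem.Chars.find line [':']
  if i ≠ -1 then PySem.Chars.strip (PySem.List.slice line (some (i + 1)) none) else []

def preprocess_asr_text_alt (raw_asr_text : String) (min_chunk_duration : Int) (max_gap : Int) : String :=
  let lines := PySem.Chars.splitOn (PySem.Chars.strip raw_asr_text.toList) ['\n']
  let tails := lines.map pvTailOf
  String.ofList (PySem.Chars.join [' '] (tails.filter (fun t => t != [])))

-- ===== PRECONDITION & SPEC =====
def Spec_preprocess_asr_text (raw_asr_text : String) (min_chunk_duration : Int) (max_gap : Int) (out : String) : Prop := out = preprocess_asr_text_alt raw_asr_text min_chunk_duration max_gap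
instance (raw_asr_text : String) (min_chunk_duration : Int) (max_gap : Int) (out : String) : Decidable (Spec_preprocess_asr_text raw_asr_text min_chunk_duration max_gap out) := by unfold Spec_preprocess_asr_text; infer_instance

-- ===== CLAIM (what is proved, stated in full; the proofs are below) =====
def Claim_equal_preprocess_asr_text : Prop := ∀ (raw_asr_text : String) (min_chunk_duration : Int) (max_gap : Int), Dom_preprocess_asr_text raw_asr_text min_chunk_duration max_gap → Spec_preprocess_asr_text raw_asr_text min_chunk_duration max_gap (preprocess_asr_text raw_asr_text min_chunk_duration max_gap)

-- ===== LEMMAS AND PROOFS =====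

theorem pv_mem_strip {x : Char} {s : List Char} (h : x ∈ PySem.Chars.strip s) : x ∈ s := by
  unfold PySem.Chars.strip PySem.Chars.rstrip PySem.Chars.lstrip at h
  simp only [List.mem_reverse] at h
  have h1 := (List.dropWhile_sublist _).subset h
  simp only [List.mem_reverse] at h1
  exact (List.dropWhile_sublist _).subset h1

theorem pv_dropWhile_eq_drop (l : List Char) (p : Char → Bool) :
    l.dropWhile p = l.drop (l.takeWhile p).length := by
  induction l with
  | nil => simp
  | cons c t ih => by_cases h : p c <;> simp [List.takeWhile_cons, h, ih]

theorem pv_splitgo_zero (fuel : Nat) (l cur : List Char) (accs : List (List Char)) :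
    PySem.Chars.splitOnMax.go [':'] fuel 0 l cur accs = ((cur.reverse ++ l) :: accs).reverse := by
  cases fuel <;> cases l <;> simp [PySem.Chars.splitOnMax.go]

theorem pv_splitgo_one (l : List Char) : ∀ (fuel : Nat) (cur : List Char) (accs : List (List Char)),
    l.length < fuel →
    PySem.Chars.splitOnMax.go [':'] fuel 1 l cur accs =
      if ':' ∈ l then
        accs.reverse ++ [cur.reverse ++ l.takeWhile (fun c => c != ':'), (l.dropWhile (fun c => c != ':')).tail]
      else accs.reverse ++ [cur.reverse ++ l] := by
  induction l with
  | nil =>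
    intro fuel cur accs hf
    cases fuel with
    | zero => omega
    | succ k => simp [PySem.Chars.splitOnMax.go]
  | cons c rest ih =>
    intro fuel cur accs hf
    cases fuel with
    | zero => omega
    | succ k =>
      have hk : rest.length < k := by simpa using hf
      by_cases hc : c = ':'
      · subst hc
        simp only [PySem.Chars.splitOnMax.go]
        rw [if_neg (by decide), if_pos (by simp [List.isPrefixOf]), pv_splitgo_zero]
        simp [List.takeWhile_cons, List.dropWhile_cons]
      · simp only [PySem.Chars.splitOnMax.go]
        rw [if_neg (by decide)]
        rw [if_neg (by simp [List.isPrefixOf, hc, Ne.symm hc])]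
        rw [ih k (c :: cur) accs hk]
        by_cases hm : ':' ∈ rest
        · rw [if_pos hm, if_pos (by simp [hm])]
          simp [List.takeWhile_cons, List.dropWhile_cons, hc]
        · rw [if_neg hm, if_neg (by simp [hm, Ne.symm hc])]
          simp
theorem pv_splitColon (l : List Char) :
    PySem.Chars.splitOnMax l [':'] 1 =
      if ':' ∈ l then [l.takeWhile (fun c => c != ':'), (l.dropWhile (fun c => c != ':')).tail]
      else [l] := by
  unfold PySem.Chars.splitOnMax
  rw [if_neg (by decide)]
  have := pv_splitgo_one l (l.length + 1) [] [] (by omega)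
  simpa using this

theorem pv_findgo (l : List Char) : ∀ (k : Nat),
    PySem.Chars.find.go [':'] l k =
      if ':' ∈ l then ((k : Int) + (l.takeWhile (fun c => c != ':')).length) else -1 := by
  induction l with
  | nil => intro k; simp [PySem.Chars.find.go]
  | cons c rest ih =>
    intro k
    by_cases hc : c = ':'
    · subst hc
      simp only [PySem.Chars.find.go]
      rw [if_pos (by simp [List.isPrefixOf])]
      simp [List.takeWhile_cons]
    · simp only [PySem.Chars.find.go]
      rw [if_neg (by simp [List.isPrefixOf, hc, Ne.symm hc])]
      rw [ih (k + 1)]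
      by_cases hm : ':' ∈ rest
      · rw [if_pos hm, if_pos (by simp [hm])]
        simp [List.takeWhile_cons, hc]
        omega
      · rw [if_neg hm, if_neg (by simp [hm, Ne.symm hc])]

theorem pv_findColon (l : List Char) :
    PySem.Chars.find l [':'] =
      if ':' ∈ l then ((l.takeWhile (fun c => c != ':')).length : Int) else -1 := by
  unfold PySem.Chars.find
  rw [pv_findgo l 0]
  split <;> simp

theorem pv_isInColon (l : List Char) :
    PySem.Chars.isIn [':'] l = decide (':' ∈ l) := by
  unfold PySem.Chars.isIn
  rw [pv_findColon l]
  by_cases hm : ':' ∈ l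
  · rw [if_pos hm]
    simp [hm, bne]
  · rw [if_neg hm]
    simp [hm]

theorem pv_countgo_zero : ∀ (fuel : Nat) (l : List Char) (acc : Nat), ':' ∉ l →
    PySem.Chars.count.go [':'] fuel l acc = acc := by
  intro fuel
  induction fuel with
  | zero => intro l acc _; simp [PySem.Chars.count.go]
  | succ k ih =>
    intro l acc hm
    cases l with
    | nil => simp [PySem.Chars.count.go]
    | cons c rest =>
      have hc : ¬ (c = ':') := fun h => hm (by simp [h])
      simp only [PySem.Chars.count.go]
      rw [if_neg (by simp [List.isPrefixOf, Ne.symm hc])]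
      exact ih rest acc (fun h => hm (List.mem_cons_of_mem _ h))

theorem pv_countColon {l : List Char} (hm : ':' ∉ l) : PySem.Chars.count l [':'] = 0 := by
  unfold PySem.Chars.count
  rw [if_neg (by decide)]
  exact pv_countgo_zero l.length l 0 hm

theorem pv_parse_none {tp : List Char} (hm : ':' ∉ tp) : pvParseTs tp = none := by
  unfold pvParseTs
  rw [pv_countColon hm]
  simp

theorem pv_no_colon_takeWhile (l : List Char) : ':' ∉ l.takeWhile (fun c => c != ':') := by
  intro h
  have := List.mem_takeWhile_imp h
  simp at this

theorem pv_dead_step (mg mcd : Int) (line : List Char) :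
    pvAStep mg mcd ([], [], none, none) line = ([], [], none, none) := by
  unfold pvAStep
  dsimp only
  by_cases hs : PySem.Chars.strip line = []
  · simp [hs]
  · rw [if_neg hs]
    by_cases hm : ':' ∈ line
    · rw [if_pos (by simp [pv_isInColon, hm, pv_splitColon])]
      have htp : ':' ∉ PySem.Chars.strip ((PySem.Chars.splitOnMax line [':'] 1).getD 0 []) := by
        intro h
        have h2 := pv_mem_strip h
        rw [pv_splitColon line, if_pos hm] at h2
        simp only [List.getD] at h2
        exact pv_no_colon_takeWhile line (by simpa using h2)
      rw [pv_parse_none htp]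
      simp
    · rw [if_neg (by simp [pv_isInColon, hm])]
      simp

theorem pv_dead_fold (mg mcd : Int) (lines : List (List Char)) :
    lines.foldl (pvAStep mg mcd) ([], [], none, none) = ([], [], none, none) := by
  induction lines with
  | nil => rfl
  | cons l ls ih => rw [List.foldl_cons, pv_dead_step, ih]

theorem pv_tailOf_mem {line : List Char} (hm : ':' ∈ line) :
    pvTailOf line = PySem.Chars.strip ((line.dropWhile (fun c => c != ':')).tail) := by
  unfold pvTailOf
  rw [pv_findColon line, if_pos hm]
  rw [if_pos (by omega)]
  have hnn : (0 : Int) ≤ ((line.takeWhile (fun c => c != ':')).length : Int) + 1 := by positivity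
  rw [PySem.List.slice_from line hnn]
  have : (((line.takeWhile (fun c => c != ':')).length : Int) + 1).toNat
      = (line.takeWhile (fun c => c != ':')).length + 1 := by omega
  rw [this, pv_dropWhile_eq_drop, ← List.tail_drop]

theorem pv_tailOf_not {line : List Char} (hm : ':' ∉ line) : pvTailOf line = [] := by
  unfold pvTailOf
  rw [pv_findColon line, if_neg hm]
  simp

theorem pv_clean_step (acc : List (List Char)) (line : List Char) :
    pvCleanStep acc line = acc ++ (if pvTailOf line != [] then [pvTailOf line] else []) := by
  unfold pvCleanStep
  by_cases hm : ':' ∈ line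
  · rw [if_pos (by simp [pv_isInColon, hm, pv_splitColon])]
    rw [pv_splitColon line, if_pos hm]
    simp only [List.getD]
    rw [pv_tailOf_mem hm]
    by_cases he : PySem.Chars.strip ((line.dropWhile (fun c => c != ':')).tail) = []
    · simp [he]
    · simp [he]
  · rw [if_neg (by simp [pv_isInColon, hm])]
    rw [pv_tailOf_not hm]
    simp

theorem pv_fb_fold (lines : List (List Char)) : ∀ (acc : List (List Char)),
    lines.foldl pvCleanStep acc = acc ++ (lines.map pvTailOf).filter (fun t => t != []) := by
  induction lines with
  | nil => intro acc; simp
  | cons l ls ih =>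
    intro acc
    rw [List.foldl_cons, ih, pv_clean_step]
    by_cases he : pvTailOf l = [] <;> simp [he, List.filter_cons]

-- ===== VERDICT (by name: the statement is the Claim_ definition above) =====
theorem preprocess_asr_text_spec : Claim_equal_preprocess_asr_text := by
  intro raw mcd mg _
  unfold Spec_preprocess_asr_text preprocess_asr_text preprocess_asr_text_alt
  simp only [pv_dead_fold, pv_fb_fold]
  simp
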